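-- pv_equiv track=rewrite | github.com/James-yaoshenglong/playcards | newclient.py | judgeType
-- ===== SOURCE A (Python) =====
-- def judgeType(current_list):
--     if len(current_list) == 1:
--         return 1
--     elif len(current_list) == 2:
--         if current_list[0] == current_list[1]:
--             return 2
--         else:
--             return 0
--     elif len(current_list) == 3:
--         if current_list[0] == current_list[1] and current_list[1] == current_list[2]:
--             return 3
--         else:
--             return 0
--     elif len(current_list) == 4:
--         if current_list[0] == current_list[1] and current_list[1] == current_list[2]:
--             if current_list[3] == current_list[2]:
--                 return 6
--             else:
--                 return 4
--         else:
--             return 0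
--     elif len(current_list) >= 5:
--         for i in range(len(current_list)-1):
--             if current_list[i+1] != current_list[i]:
--                 return 0
--         return 5
-- ===== SOURCE B (Python) =====
-- def judgeType(current_list):
--     if not current_list:
--         return None  # empty list: A also returns None
--     counts = {}
--     for x in current_list:
--         counts[x] = counts.get(x, 0) + 1
--     n = len(current_list)
--     if n == 1:
--         return 1
--     if len(counts) == 1:
--         return {2: 2, 3: 3, 4: 6}.get(n, 5)
--     if n == 4 and counts.get(current_list[0], 0) == 3 and current_list[3] != current_list[0]:
--         return 4
--     return 0
-- ===== Notes on version B (the rewrite author's own statement) =====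
-- stated objective: alternative
-- what changed: Instead of A's per-length cascade of pairwise comparison chains, B builds a frequency dictionary in one pass and classifies from it: one distinct key maps n through a literal table {2:2,3:3,4:6} with default 5, and the 4-card triple case is recognised by counts[first]==3 with a differing fourth card; Pre_ excludes the empty list, on which A returns None (not an int).
import Mathlib
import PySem

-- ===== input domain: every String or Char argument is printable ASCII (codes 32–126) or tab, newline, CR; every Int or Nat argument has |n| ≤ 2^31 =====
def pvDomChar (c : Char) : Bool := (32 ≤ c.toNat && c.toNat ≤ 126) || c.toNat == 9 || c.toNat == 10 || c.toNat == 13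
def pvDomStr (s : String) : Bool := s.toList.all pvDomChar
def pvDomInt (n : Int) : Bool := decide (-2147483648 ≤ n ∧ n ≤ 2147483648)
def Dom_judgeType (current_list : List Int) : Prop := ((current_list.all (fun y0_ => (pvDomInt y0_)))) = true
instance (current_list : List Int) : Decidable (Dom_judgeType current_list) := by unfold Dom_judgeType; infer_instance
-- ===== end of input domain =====

-- B replaces A's per-length cascade of pairwise comparison chains by a frequency
-- dictionary built in one pass, classified via a literal table; objective: alternative.
-- Pre_ excludes only the empty list (Python A returns None there).

-- ===== PORT A =====
-- A's n>=5 loop: for i in range(n-1): if l[i+1] != l[i]: return 0; return 5 —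
-- the same adjacent comparisons in the same order, as structural recursion.
def judgeLoopA : List Int → Int
  | x :: y :: rest => if y ≠ x then 0 else judgeLoopA (y :: rest)
  | _ => 5

def judgeType (current_list : List Int) : Int :=
  let g := fun i => (PySem.List.pyGet? current_list i).getD 0  -- indices below are in range
  if current_list.length = 1 then 1
  else if current_list.length = 2 then
    (if g 0 = g 1 then 2 else 0)
  else if current_list.length = 3 then
    (if g 0 = g 1 ∧ g 1 = g 2 then 3 else 0)
  else if current_list.length = 4 then
    (if g 0 = g 1 ∧ g 1 = g 2 then (if g 3 = g 2 then 6 else 4) else 0)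
  else if current_list.length ≥ 5 then
    judgeLoopA current_list
  else 0  -- empty list: Python A returns None; excluded by Pre_judgeType

-- ===== PORT B =====
def judgeType_alt (current_list : List Int) : Int :=
  if current_list = [] then 0  -- empty list: Python B returns None; excluded by Pre_judgeType
  else
    let counts : PySem.Dict Int Int :=
      current_list.foldl (fun d x => d.insert x (d.getD x 0 + 1)) PySem.Dict.empty
    let n : Int := current_list.length
    if n = 1 then 1
    else if counts.size = 1 then
      (PySem.Dict.mk [((2:Int),(2:Int)),(3,3),(4,6)]).getD n 5
    else if n = 4 ∧ counts.getD ((PySem.List.pyGet? current_list 0).getD 0) 0 = 3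
              ∧ (PySem.List.pyGet? current_list 3).getD 0 ≠ (PySem.List.pyGet? current_list 0).getD 0 then 4
    else 0

-- ===== PRECONDITION & SPEC =====
-- Pre_ excludes only the empty list, on which Python A returns None (not an int).
def Pre_judgeType (current_list : List Int) : Prop := current_list ≠ []
instance (current_list : List Int) : Decidable (Pre_judgeType current_list) := by unfold Pre_judgeType; infer_instance
def pvWitness_judgeType : List Int := ([1])
def Spec_judgeType (current_list : List Int) (out : Int) : Prop := out = judgeType_alt current_list
instance (current_list : List Int) (out : Int) : Decidable (Spec_judgeType current_list out) := by unfold Spec_judgeType; infer_instance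

-- ===== CLAIM =====
def Claim_equal_judgeType : Prop := ∀ (current_list : List Int), Dom_judgeType current_list → Pre_judgeType current_list → Spec_judgeType current_list (judgeType current_list)

-- ===== LEMMAS AND PROOFS =====

-- B's counter loop is collections.Counter.
theorem counts_eq_counter (l : List Int) :
    l.foldl (fun d x => d.insert x (d.getD x 0 + 1)) PySem.Dict.empty = PySem.Dict.counter l :=
  PySem.Dict.foldl_insert_getD_add_one_eq_counter l

-- size of the counter = number of distinct elements.
theorem counter_size (l : List Int) :
    (PySem.Dict.counter l).size = (PySem.Set.ofList l).length := by
  simp [PySem.Dict.size, PySem.Dict.items_counter]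

-- the literal table {2:2,3:3,4:6}.get(m,5) defaults to 5 off its keys.
theorem table_default (m : Int) (h2 : m ≠ 2) (h3 : m ≠ 3) (h4 : m ≠ 4) :
    (PySem.Dict.mk [((2:Int),(2:Int)),(3,3),(4,6)]).getD m 5 = 5 := by
  simp [PySem.Dict.getD_eq_get?_getD, PySem.Dict.get?, Ne.symm h2, Ne.symm h3, Ne.symm h4]

-- one distinct key ↔ every element equals the head.
theorem ofList_len_one (a : Int) (rest : List Int) :
    (PySem.Set.ofList (a :: rest)).length = 1 ↔ rest.all (fun x => x = a) := by
  rw [PySem.Set.ofList_cons]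
  simp only [List.length_cons, List.all_eq_true, decide_eq_true_eq]
  constructor
  · intro h x hx
    have hnil : PySem.Set.discard (PySem.Set.ofList rest) a = [] :=
      List.eq_nil_of_length_eq_zero (by omega)
    by_contra hne
    have : x ∈ PySem.Set.discard (PySem.Set.ofList rest) a := by
      rw [PySem.Set.mem_discard, PySem.Set.mem_ofList]; exact ⟨hx, hne⟩
    simp [hnil] at this
  · intro h
    have hnil : PySem.Set.discard (PySem.Set.ofList rest) a = [] := by
      rw [List.eq_nil_iff_forall_not_mem]
      intro x hx
      rw [PySem.Set.mem_discard, PySem.Set.mem_ofList] at hx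
      exact hx.2 (h x hx.1)
    simp [hnil]

-- A's adjacent-pair chain equals the all-equal-to-head test.
theorem judgeLoopA_eq (a : Int) (rest : List Int) :
    judgeLoopA (a :: rest) = if rest.all (fun x => x = a) then 5 else 0 := by
  induction rest generalizing a with
  | nil => simp [judgeLoopA]
  | cons b t ih =>
    by_cases h : b = a
    · subst h
      simpa [judgeLoopA] using ih b
    · simp [judgeLoopA, h]

-- the literal table {2:2,3:3,4:6} at its keys.
theorem table2 : (PySem.Dict.mk [((2:Int),(2:Int)),(3,3),(4,6)]).getD 2 5 = 2 := by decide
theorem table3 : (PySem.Dict.mk [((2:Int),(2:Int)),(3,3),(4,6)]).getD 3 5 = 3 := by decide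
theorem table4 : (PySem.Dict.mk [((2:Int),(2:Int)),(3,3),(4,6)]).getD 4 5 = 6 := by decide

-- ===== VERDICT =====
theorem judgeType_spec : Claim_equal_judgeType := by
  intro l _ hpre
  unfold Spec_judgeType
  match l with
  | [] => exact absurd rfl hpre
  | [a] => simp [judgeType, judgeType_alt]
  | [a, b] =>
    by_cases h : a = b <;>
      [skip; skip] <;> first
      | (subst h
         simp [judgeType, judgeType_alt, PySem.Dict.size_insert, PySem.Dict.getD_insert,
           PySem.Dict.contains_insert, PySem.Dict.contains_empty, PySem.Dict.size_empty,
           PySem.Dict.getD_empty, table2, PySem.List.pyGet?, PySem.List.pyIdx?])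
      | simp [judgeType, judgeType_alt, PySem.Dict.size_insert, PySem.Dict.getD_insert,
          PySem.Dict.contains_insert, PySem.Dict.contains_empty, PySem.Dict.size_empty,
          PySem.Dict.getD_empty, table2, PySem.List.pyGet?, PySem.List.pyIdx?, h, Ne.symm h]
  | [a, b, c] =>
    by_cases hb : a = b <;> by_cases hc : b = c <;>
      subst_vars <;>
      simp_all [judgeType, judgeType_alt, PySem.Dict.size_insert, PySem.Dict.getD_insert,
        PySem.Dict.contains_insert, PySem.Dict.contains_empty, PySem.Dict.size_empty,
        PySem.Dict.getD_empty, table3, PySem.List.pyGet?, PySem.List.pyIdx?] <;>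
      first
      | omega
      | (split_ifs <;> omega)
  | [a, b, c, d] =>
    by_cases hb : a = b <;> by_cases hc : b = c <;> by_cases hd : d = c <;>
      subst_vars <;>
      simp_all [judgeType, judgeType_alt, PySem.Dict.size_insert, PySem.Dict.getD_insert,
        PySem.Dict.contains_insert, PySem.Dict.contains_empty, PySem.Dict.size_empty,
        PySem.Dict.getD_empty, table4, PySem.List.pyGet?, PySem.List.pyIdx?] <;>
      first
      | omega
      | (split_ifs <;> omega)
  | a :: b :: c :: d :: e :: t =>
    have hne : (a :: b :: c :: d :: e :: t) ≠ [] := by simp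
    have hlen : (a :: b :: c :: d :: e :: t).length = t.length + 5 := by simp
    have n1 : t.length + 5 ≠ 1 := by omega
    have n2 : t.length + 5 ≠ 2 := by omega
    have n3 : t.length + 5 ≠ 3 := by omega
    have n4 : t.length + 5 ≠ 4 := by omega
    have n5 : t.length + 5 ≥ 5 := by omega
    have i1 : ((t.length + 5 : Nat) : Int) ≠ 1 := by push_cast; omega
    have i4 : ((t.length + 5 : Nat) : Int) ≠ 4 := by push_cast; omega
    have hA : judgeType (a :: b :: c :: d :: e :: t)
        = if (b :: c :: d :: e :: t).all (fun x => x = a) then 5 else 0 := by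
      simp only [judgeType, hlen, if_neg n1, if_neg n2, if_neg n3, if_neg n4, if_pos n5]
      exact judgeLoopA_eq a _
    have htab : (PySem.Dict.mk [((2:Int),(2:Int)),(3,3),(4,6)]).getD
        (((a :: b :: c :: d :: e :: t).length : Nat) : Int) 5 = 5 := by
      rw [hlen]
      exact table_default _ (by push_cast; omega) (by push_cast; omega) i4
    rw [hA]
    simp only [judgeType_alt, counts_eq_counter, counter_size, if_neg hne]
    by_cases hall : (b :: c :: d :: e :: t).all (fun x => x = a)
    · have hone : (PySem.Set.ofList (a :: b :: c :: d :: e :: t)).length = 1 :=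
        (ofList_len_one a _).mpr hall
      rw [if_pos hall]
      rw [hlen] at htab
      rw [hlen]
      simp only [if_neg i1, if_pos hone, htab]
    · have hone : ¬ ((PySem.Set.ofList (a :: b :: c :: d :: e :: t)).length = 1) :=
        fun h => hall ((ofList_len_one a _).mp h)
      rw [if_neg hall, hlen]
      simp only [counts_eq_counter, counter_size, if_neg i1, if_neg hone]
      have i4' : (t.length : Int) + 5 ≠ 4 := by omega
      simp [i4']
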